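-- pv_equiv track=rewrite | github.com/24-Fahed/RAG- | rag_langgraph/nodes/repacking.py | _sides_order
-- ===== SOURCE A (Python) =====
-- def _sides_order(documents: list) -> list:
--     """
--     应用 sides 排序：交替从头部和尾部放置。
--
--     示例：[1,2,3,4,5,6,7,8,9] -> [1,3,5,7,9,8,6,4,2]
--     """
--     result = []
--     left = True
--     left_idx = 0
--     right_idx = len(documents) - 1
--
--     for i, _ in enumerate(documents):
--         if left:
--             result.append(documents[left_idx])
--             left_idx += 1
--         else:
--             result.append(documents[right_idx])
--             right_idx -= 1
--         left = not left
--
--     return result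
-- ===== SOURCE B (Python) =====
-- def _sides_order(documents: list) -> list:
--     """Head/tail interleave: pair the list with its reverse, flatten, truncate to n."""
--     merged = []
--     for f, b in zip(documents, reversed(documents)):
--         merged.append(f)
--         merged.append(b)
--     return merged[:len(documents)]
-- ===== Notes on version B (the rewrite author's own statement) =====
-- stated objective: simpler
-- what changed: Replaces the toggle flag and two converging indices with a single pass zipping the list with its reverse, flattening each (front, back) pair and truncating to len(documents).
import Mathlib
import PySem

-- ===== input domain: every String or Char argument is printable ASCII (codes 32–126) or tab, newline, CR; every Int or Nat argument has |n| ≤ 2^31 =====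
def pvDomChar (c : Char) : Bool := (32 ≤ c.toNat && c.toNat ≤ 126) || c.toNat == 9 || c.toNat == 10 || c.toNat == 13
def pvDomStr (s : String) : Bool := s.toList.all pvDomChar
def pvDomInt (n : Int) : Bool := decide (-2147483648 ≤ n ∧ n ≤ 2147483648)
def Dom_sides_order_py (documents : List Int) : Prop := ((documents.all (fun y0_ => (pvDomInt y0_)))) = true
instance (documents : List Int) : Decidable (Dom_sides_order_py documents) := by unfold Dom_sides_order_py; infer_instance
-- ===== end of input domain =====

-- B replaces A's toggle flag and two converging indices by zipping the list with its
-- reverse, flattening the (front, back) pairs and truncating to the original length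
-- (objective: simpler).

-- ===== PORT A =====
-- state = (result, left, left_idx, right_idx); the loop 'for i, _ in enumerate(documents)'
-- runs once per element, ignoring it.  Both indexings are always in range, so
-- documents[idx] is ported exactly as pyGetD documents idx 0.
def sides_order_py (documents : List Int) : List Int :=
  (documents.foldl
    (fun (st : List Int × Bool × Int × Int) _ =>
      let result := st.1; let left := st.2.1; let li := st.2.2.1; let ri := st.2.2.2
      if left then
        (result ++ [PySem.List.pyGetD documents li 0], false, li + 1, ri)
      else
        (result ++ [PySem.List.pyGetD documents ri 0], true, li, ri - 1))
    (([] : List Int), true, (0 : Int), (documents.length : Int) - 1)).1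

-- ===== PORT B =====
def sides_order_py_alt (documents : List Int) : List Int :=
  let merged :=
    (documents.zip documents.reverse).foldl (fun acc p => acc ++ [p.1, p.2]) []
  PySem.List.slice merged none (some (documents.length : Int))

-- ===== PRECONDITION & SPEC =====
def Spec_sides_order_py (documents : List Int) (out : List Int) : Prop := out = sides_order_py_alt documents
instance (documents : List Int) (out : List Int) : Decidable (Spec_sides_order_py documents out) := by unfold Spec_sides_order_py; infer_instance

-- ===== CLAIM (what is proved, stated in full; the proofs are below) =====
def Claim_equal_sides_order_py : Prop := ∀ (documents : List Int), Dom_sides_order_py documents → Spec_sides_order_py documents (sides_order_py documents)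

-- ===== LEMMAS AND PROOFS =====

-- A's loop body as a named function.
def pvStepA (documents : List Int) (st : List Int × Bool × Int × Int) (_ : Int) :
    List Int × Bool × Int × Int :=
  let result := st.1; let left := st.2.1; let li := st.2.2.1; let ri := st.2.2.2
  if left then
    (result ++ [PySem.List.pyGetD documents li 0], false, li + 1, ri)
  else
    (result ++ [PySem.List.pyGetD documents ri 0], true, li, ri - 1)

lemma stepA_eq (documents : List Int) :
    (fun (st : List Int × Bool × Int × Int) (_ : Int) =>
      let result := st.1; let left := st.2.1; let li := st.2.2.1; let ri := st.2.2.2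
      if left then
        (result ++ [PySem.List.pyGetD documents li 0], false, li + 1, ri)
      else
        (result ++ [PySem.List.pyGetD documents ri 0], true, li, ri - 1))
    = pvStepA documents := rfl

-- One loop step shifts the "left-first" index pattern to the "right-first" one.
lemma pvShiftPQ (documents : List Int) (a b : Int) (j : Nat) :
    (if j % 2 = 0 then PySem.List.pyGetD documents (b - ((j / 2 : Nat) : Int)) 0
     else PySem.List.pyGetD documents ((a + 1) + ((j / 2 : Nat) : Int)) 0)
    = (if (j + 1) % 2 = 0 then PySem.List.pyGetD documents (a + (((j + 1) / 2 : Nat) : Int)) 0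
       else PySem.List.pyGetD documents (b - (((j + 1) / 2 : Nat) : Int)) 0) := by
  by_cases hp : j % 2 = 0
  · rw [if_pos hp, if_neg (by omega)]
    congr 1
    omega
  · rw [if_neg hp, if_pos (by omega)]
    congr 1
    omega

lemma pvShiftQP (documents : List Int) (a b : Int) (j : Nat) :
    (if j % 2 = 0 then PySem.List.pyGetD documents (a + ((j / 2 : Nat) : Int)) 0
     else PySem.List.pyGetD documents ((b - 1) - ((j / 2 : Nat) : Int)) 0)
    = (if (j + 1) % 2 = 0 then PySem.List.pyGetD documents (b - (((j + 1) / 2 : Nat) : Int)) 0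
       else PySem.List.pyGetD documents (a + (((j + 1) / 2 : Nat) : Int)) 0) := by
  by_cases hp : j % 2 = 0
  · rw [if_pos hp, if_neg (by omega)]
    congr 1
    omega
  · rw [if_neg hp, if_pos (by omega)]
    congr 1
    omega

-- Closed form of A's loop, proved for both values of the toggle simultaneously.
lemma loopA_closed (documents : List Int) (l : List Int) :
    ∀ (acc : List Int) (li ri : Int),
      ((l.foldl (pvStepA documents) (acc, true, li, ri)).1 =
        acc ++ (List.range l.length).map (fun j =>
          if j % 2 = 0 then PySem.List.pyGetD documents (li + ((j / 2 : Nat) : Int)) 0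
          else PySem.List.pyGetD documents (ri - ((j / 2 : Nat) : Int)) 0))
      ∧
      ((l.foldl (pvStepA documents) (acc, false, li, ri)).1 =
        acc ++ (List.range l.length).map (fun j =>
          if j % 2 = 0 then PySem.List.pyGetD documents (ri - ((j / 2 : Nat) : Int)) 0
          else PySem.List.pyGetD documents (li + ((j / 2 : Nat) : Int)) 0)) := by
  induction l with
  | nil => intro acc li ri; simp
  | cons x l ih =>
    intro acc li ri
    constructor
    · show (l.foldl (pvStepA documents) (pvStepA documents (acc, true, li, ri) x)).1 = _
      rw [show pvStepA documents (acc, true, li, ri) x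
            = (acc ++ [PySem.List.pyGetD documents li 0], false, li + 1, ri) from rfl]
      rw [(ih _ (li + 1) ri).2]
      rw [List.length_cons, List.range_succ_eq_map, List.map_cons, List.map_map]
      simp only [List.append_assoc, List.singleton_append]
      congr 1
      congr 1
      · norm_num
      · apply List.map_congr_left
        intro j _
        show _ = (if (j + 1) % 2 = 0 then PySem.List.pyGetD documents (li + (((j + 1) / 2 : Nat) : Int)) 0
                  else PySem.List.pyGetD documents (ri - (((j + 1) / 2 : Nat) : Int)) 0)
        exact pvShiftPQ documents li ri j
    · show (l.foldl (pvStepA documents) (pvStepA documents (acc, false, li, ri) x)).1 = _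
      rw [show pvStepA documents (acc, false, li, ri) x
            = (acc ++ [PySem.List.pyGetD documents ri 0], true, li, ri - 1) from rfl]
      rw [(ih _ li (ri - 1)).1]
      rw [List.length_cons, List.range_succ_eq_map, List.map_cons, List.map_map]
      simp only [List.append_assoc, List.singleton_append]
      congr 1
      congr 1
      · norm_num
      · apply List.map_congr_left
        intro j _
        show _ = (if (j + 1) % 2 = 0 then PySem.List.pyGetD documents (ri - (((j + 1) / 2 : Nat) : Int)) 0
                  else PySem.List.pyGetD documents (li + (((j + 1) / 2 : Nat) : Int)) 0)
        exact pvShiftQP documents li ri j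

-- A in closed form.
lemma sides_order_py_eq (documents : List Int) :
    sides_order_py documents =
      (List.range documents.length).map (fun j =>
        if j % 2 = 0 then PySem.List.pyGetD documents ((j / 2 : Nat) : Int) 0
        else PySem.List.pyGetD documents (((documents.length : Int) - 1) - ((j / 2 : Nat) : Int)) 0) := by
  unfold sides_order_py
  rw [stepA_eq]
  rw [(loopA_closed documents documents [] 0 ((documents.length : Int) - 1)).1]
  simp

-- getElem? of the flattened pair list.
lemma flatpair_getElem? (ps : List (Int × Int)) :
    ∀ i : Nat, (ps.flatMap (fun p => [p.1, p.2]))[i]? =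
      (ps[i / 2]?).map (fun p => if i % 2 = 0 then p.1 else p.2) := by
  induction ps with
  | nil => intro i; simp
  | cons p ps ih =>
    intro i
    match i with
    | 0 => simp
    | 1 => simp
    | (i + 2) =>
      have h2 : (i + 2) / 2 = i / 2 + 1 := by omega
      have h3 : (i + 2) % 2 = i % 2 := by omega
      simp only [List.flatMap_cons, List.cons_append, List.nil_append,
        List.getElem?_cons_succ, h2, h3]
      exact ih i

-- ===== VERDICT (by name: the statement is the Claim_ definition above) =====
theorem sides_order_py_spec : Claim_equal_sides_order_py := by
  intro documents _
  show sides_order_py documents = sides_order_py_alt documents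
  unfold sides_order_py_alt
  rw [PySem.List.foldl_append_eq_flatMap, PySem.List.slice_to_natCast, List.nil_append]
  rw [sides_order_py_eq]
  apply List.ext_getElem?
  intro i
  rw [List.getElem?_take, flatpair_getElem?, List.getElem?_map]
  by_cases hi : i < documents.length
  · rw [List.getElem?_range hi, if_pos hi]
    have hzlen : i / 2 < (documents.zip documents.reverse).length := by
      simp only [List.length_zip, List.length_reverse, Nat.min_self]
      omega
    rw [List.getElem?_eq_getElem hzlen, List.getElem_zip]
    simp only [Option.map_some]
    congr 1
    by_cases hp : i % 2 = 0
    · rw [if_pos hp, if_pos hp, PySem.List.pyGetD_natCast]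
      exact List.getD_eq_getElem documents 0 (by omega)
    · rw [if_neg hp, if_neg hp]
      have hcast : ((documents.length : Int) - 1) - ((i / 2 : Nat) : Int)
          = ((documents.length - 1 - i / 2 : Nat) : Int) := by omega
      rw [hcast, PySem.List.pyGetD_natCast, List.getElem_reverse,
        List.getD_eq_getElem documents 0 (by omega)]
  · rw [if_neg hi, List.getElem?_eq_none (l := List.range documents.length) (by simp; omega)]
    simp
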